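-- pv_equiv track=rewrite | github.com/manimanis/2SC_2021 | codes/dc03_2022/parking.py | chercher_place_vide
-- ===== SOURCE A (Python) =====
-- CAP = 8
--
-- def chercher_place_vide(ne, etages):
--     p = -1
--     i = ne - 1
--     while p == -1 and i >= 0:
--         if etages[i] < CAP:
--             p = i
--         else:
--             i -= 1
--     return p
-- ===== SOURCE B (Python) =====
-- CAP = 8
--
-- def chercher_place_vide(ne, etages):
--     frees = [i for i in range(ne) if etages[i] < CAP]
--     return max(frees) if frees else -1
-- ===== Notes on version B (the rewrite author's own statement) =====
-- stated objective: alternative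
-- what changed: Replaces the downward early-exit while-loop with an ascending full scan that collects all free-floor indices and returns their maximum (or -1 if none).
import Mathlib
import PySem

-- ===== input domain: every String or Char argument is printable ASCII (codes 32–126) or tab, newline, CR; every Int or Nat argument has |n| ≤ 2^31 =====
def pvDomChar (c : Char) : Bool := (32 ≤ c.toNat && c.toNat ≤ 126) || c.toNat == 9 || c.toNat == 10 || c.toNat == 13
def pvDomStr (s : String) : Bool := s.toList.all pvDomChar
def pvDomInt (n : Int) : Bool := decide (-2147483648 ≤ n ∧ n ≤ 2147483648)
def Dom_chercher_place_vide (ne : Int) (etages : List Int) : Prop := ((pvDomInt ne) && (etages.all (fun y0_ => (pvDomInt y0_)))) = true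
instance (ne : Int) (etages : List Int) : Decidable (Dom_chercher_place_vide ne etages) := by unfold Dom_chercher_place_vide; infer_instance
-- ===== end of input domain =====

-- B replaces A's downward early-exit search with an ascending scan collecting all free indices plus a max reduction (alternative decomposition, same cost).

-- ===== PORT A =====
-- the while loop: p == -1 and i >= 0; check etages[i] < CAP, else i -= 1
def pvALoop (etages : List Int) (k : Nat) : Int :=
  if etages.getD k 0 < 8 then (k : Int)
  else if k = 0 then -1 else pvALoop etages (k - 1)
termination_by k

def chercher_place_vide (ne : Int) (etages : List Int) : Int :=
  if ne - 1 < 0 then -1 else pvALoop etages (ne - 1).toNat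

-- ===== PORT B =====
def chercher_place_vide_alt (ne : Int) (etages : List Int) : Int :=
  let frees := (PySem.List.pyRange 0 ne 1).filter
    (fun i => decide ((PySem.List.pyGet? etages i).getD 0 < 8))
  match PySem.List.max? frees (fun v => v) with
  | some m => m
  | none => -1

-- ===== PRECONDITION & SPEC =====
-- Pre_: etages[i] is accessed at i = ne-1 downward, so A (and B) raise IndexError iff ne > len(etages)
def Pre_chercher_place_vide (ne : Int) (etages : List Int) : Prop := ne ≤ (etages.length : Int)
instance (ne : Int) (etages : List Int) : Decidable (Pre_chercher_place_vide ne etages) := by unfold Pre_chercher_place_vide; infer_instance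
def pvWitness_chercher_place_vide : Int × List Int := (2, [9, 3])

def Spec_chercher_place_vide (ne : Int) (etages : List Int) (out : Int) : Prop := out = chercher_place_vide_alt ne etages
instance (ne : Int) (etages : List Int) (out : Int) : Decidable (Spec_chercher_place_vide ne etages out) := by unfold Spec_chercher_place_vide; infer_instance

-- ===== CLAIM (what is proved, stated in full; the proofs are below) =====
def Claim_equal_chercher_place_vide : Prop := ∀ (ne : Int) (etages : List Int), Dom_chercher_place_vide ne etages → Pre_chercher_place_vide ne etages → Spec_chercher_place_vide ne etages (chercher_place_vide ne etages)

-- ===== LEMMAS AND PROOFS =====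

-- max? of a list whose appended last element bounds everything before it
lemma max?_append_last (l : List Int) (x : Int) (h : ∀ y ∈ l, y ≤ x) :
    PySem.List.max? (l ++ [x]) (fun v => v) = some x := by
  cases l with
  | nil => simp [PySem.List.max?_id_cons]
  | cons a t =>
    rw [List.cons_append, PySem.List.max?_id_cons, List.foldl_append]
    have hb : t.foldl max a ≤ x := by
      rcases PySem.List.foldl_max_mem t a with he | hm
      · rw [he]; exact h a (by simp)
      · exact h _ (by simp [hm])
    simp [max_eq_right hb]

lemma main_eq (etages : List Int) (n : Nat) (hn : (n : Int) ≤ (etages.length : Int)) :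
    chercher_place_vide (n : Int) etages = chercher_place_vide_alt (n : Int) etages := by
  induction n with
  | zero =>
    simp [chercher_place_vide, chercher_place_vide_alt, PySem.List.pyRange_one_eq_nil,
      PySem.List.max?]
  | succ n ih =>
    have hlen : n < etages.length := by omega
    have hsplit : PySem.List.pyRange 0 ((n : Int) + 1) 1
        = PySem.List.pyRange 0 (n : Int) 1 ++ [(n : Int)] := by
      exact PySem.List.pyRange_one_succ_right (by omega)
    have hget : (PySem.List.pyGet? etages (n : Int)).getD 0 = etages[n] := by
      simp [PySem.List.pyGet?_natCast, List.getElem?_eq_getElem hlen]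
    have hA : chercher_place_vide ((n : Int) + 1) etages = pvALoop etages n := by
      have h1 : ¬ ((n : Int) + 1 - 1 < 0) := by omega
      have h2 : ((n : Int) + 1 - 1).toNat = n := by omega
      simp [chercher_place_vide]
    have hcast : ((n + 1 : Nat) : Int) = (n : Int) + 1 := by push_cast; ring
    rw [hcast] at hn ⊢
    by_cases hf : etages[n] < 8
    · -- floor n is free: A stops at n, B's max is n
      have hpred : (fun i => decide ((PySem.List.pyGet? etages i).getD 0 < 8)) (n : Int) = true := by
        simp only [hget]; simp [hf]
      have hbound : ∀ y ∈ (PySem.List.pyRange 0 (n : Int) 1).filter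
          (fun i => decide ((PySem.List.pyGet? etages i).getD 0 < 8)), y ≤ (n : Int) := by
        intro y hy
        have := (PySem.List.mem_pyRange_one).mp (List.mem_of_mem_filter hy)
        omega
      rw [hA, pvALoop]
      rw [show etages.getD n 0 = etages[n] from List.getD_eq_getElem etages 0 hlen]
      simp only [hf, if_true]
      simp only [chercher_place_vide_alt, hsplit, List.filter_append, List.filter_cons,
        List.filter_nil, hpred]
      simp only [if_true]
      rw [max?_append_last _ _ hbound]
    · -- floor n is full: both reduce to the problem at n
      have hpred : (fun i => decide ((PySem.List.pyGet? etages i).getD 0 < 8)) (n : Int) = false := by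
        simp only [hget]; simp [hf]
      have hB : chercher_place_vide_alt ((n : Int) + 1) etages
          = chercher_place_vide_alt (n : Int) etages := by
        simp only [chercher_place_vide_alt, hsplit, List.filter_append, List.filter_cons,
          List.filter_nil, hpred]
        simp
      have hA' : pvALoop etages n = chercher_place_vide (n : Int) etages := by
        rw [pvALoop]
        rw [show etages.getD n 0 = etages[n] from List.getD_eq_getElem etages 0 hlen]
        simp only [hf, if_false]
        by_cases h0 : n = 0
        · simp [h0, chercher_place_vide]
        · have h1 : ¬ ((n : Int) - 1 < 0) := by omega
          have h2 : ((n : Int) - 1).toNat = n - 1 := by omega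
          simp [chercher_place_vide, h0, h1, h2]
      rw [hA, hA', hB, ih (by omega)]

-- ===== VERDICT (by name: the statement is the Claim_ definition above) =====
theorem chercher_place_vide_spec : Claim_equal_chercher_place_vide := by
  intro ne etages _ hpre
  unfold Pre_chercher_place_vide at hpre
  unfold Spec_chercher_place_vide
  by_cases hpos : 0 < ne
  · have h : ne = ((ne.toNat : Nat) : Int) := by omega
    rw [h]
    exact main_eq etages ne.toNat (by omega)
  · have h1 : ne - 1 < 0 := by omega
    have h2 : PySem.List.pyRange 0 ne 1 = [] := PySem.List.pyRange_one_eq_nil (by omega)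
    simp [chercher_place_vide, chercher_place_vide_alt, h1, h2, PySem.List.max?]
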